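-- pv_equiv track=rewrite | github.com/KashyapTan/Xpdite | source/services/marketplace/service.py | _infer_package_spec
-- ===== SOURCE A (Python) =====
-- from typing import Any, Iterable, Literal, Optional
--
-- _PACKAGE_FLAGS_WITH_VALUE = {
--     "npx": {"-p", "--package", "-c", "--call", "--registry", "--cache", "--userconfig", "--prefix", "--node-options"},
--     "uvx": {"--from", "--index-url", "--extra-index-url", "--python", "--cache-dir"},
-- }
--
-- _PACKAGE_FLAGS_NO_VALUE = {
--     "npx": {"-y", "--yes", "--quiet", "-q", "--ignore-existing"},
--     "uvx": {"--refresh", "--isolated", "--verbose", "-v", "-q", "--quiet"},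
-- }
--
-- def _infer_package_spec(runner: str, args: list[str]) -> str:
--     value_flags = _PACKAGE_FLAGS_WITH_VALUE.get(runner, set())
--     no_value_flags = _PACKAGE_FLAGS_NO_VALUE.get(runner, set())
--     pending_flag: Optional[str] = None
--
--     for token in args:
--         if pending_flag is not None:
--             if pending_flag in {"-p", "--package", "--from"}:
--                 return token
--             pending_flag = None
--             continue
--
--         if token in value_flags:
--             pending_flag = token
--             continue
--         if token in no_value_flags:
--             continue
--         if token.startswith("-"):
--             continue
--         return token
--
--     raise ValueError(f"Could not determine the package name from the {runner} command")
-- ===== SOURCE B (Python) =====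
-- _PACKAGE_FLAGS_WITH_VALUE = {
--     "npx": {"-p", "--package", "-c", "--call", "--registry", "--cache", "--userconfig", "--prefix", "--node-options"},
--     "uvx": {"--from", "--index-url", "--extra-index-url", "--python", "--cache-dir"},
-- }
--
-- _PACKAGE_FLAGS_NO_VALUE = {
--     "npx": {"-y", "--yes", "--quiet", "-q", "--ignore-existing"},
--     "uvx": {"--refresh", "--isolated", "--verbose", "-v", "-q", "--quiet"},
-- }
--
-- def _infer_package_spec(runner: str, args: list[str]) -> str:
--     value_flags = _PACKAGE_FLAGS_WITH_VALUE.get(runner, set())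
--     no_value_flags = _PACKAGE_FLAGS_NO_VALUE.get(runner, set())
--     pkg_flags = {"-p", "--package", "--from"}
--     # Dynamic programming over suffixes, computed right-to-left:
--     # res     = answer for the current suffix (None = no package token: ValueError)
--     # res_next = answer for the suffix starting one token later
--     # head    = first token of the current suffix (None if it is empty)
--     res = None
--     res_next = None
--     head = None
--     for tok in reversed(args):
--         if tok in value_flags:
--             cur = head if tok in pkg_flags else res_next
--         elif tok in no_value_flags or tok.startswith("-"):
--             cur = res
--         else:
--             cur = tok
--         res, res_next, head = cur, res, tok
--     if res is None:
--         raise ValueError(f"Could not determine the package name from the {runner} command")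
--     return res
-- ===== Notes on version B (the rewrite author's own statement) =====
-- stated objective: alternative
-- what changed: Replaced the forward scan carrying a pending_flag state by a right-to-left dynamic programming pass over reversed(args) that computes, for every suffix, the answer of scanning that suffix, keeping (answer of suffix, answer of suffix[1:], head of suffix).
import Mathlib
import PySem

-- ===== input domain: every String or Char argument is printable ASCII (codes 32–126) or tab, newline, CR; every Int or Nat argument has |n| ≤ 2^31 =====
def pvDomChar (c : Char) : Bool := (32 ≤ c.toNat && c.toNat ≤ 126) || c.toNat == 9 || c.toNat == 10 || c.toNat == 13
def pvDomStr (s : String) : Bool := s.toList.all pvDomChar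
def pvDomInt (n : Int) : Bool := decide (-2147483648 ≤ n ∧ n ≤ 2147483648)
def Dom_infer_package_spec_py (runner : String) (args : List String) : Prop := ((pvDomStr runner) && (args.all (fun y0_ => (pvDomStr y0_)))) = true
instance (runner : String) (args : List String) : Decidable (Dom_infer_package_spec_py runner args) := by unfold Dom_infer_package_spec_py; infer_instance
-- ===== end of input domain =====

-- B replaces A's forward scan with a pending_flag accumulator by a right-to-left dynamic
-- programming pass over reversed(args) (answer per suffix); agreement proved on every input
-- where A returns (Pre_ excludes exactly the ValueError path, where both programs raise).

-- ===== PORT A =====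
def pvValueFlags (runner : String) : List String :=
  if runner = "npx" then ["-p", "--package", "-c", "--call", "--registry", "--cache", "--userconfig", "--prefix", "--node-options"]
  else if runner = "uvx" then ["--from", "--index-url", "--extra-index-url", "--python", "--cache-dir"]
  else []

def pvNoValueFlags (runner : String) : List String :=
  if runner = "npx" then ["-y", "--yes", "--quiet", "-q", "--ignore-existing"]
  else if runner = "uvx" then ["--refresh", "--isolated", "--verbose", "-v", "-q", "--quiet"]
  else []

-- A's for-loop over tokens carrying pending_flag; "" stands for the ValueError path (outside Pre_).
def pvLoopA (vf nvf : List String) : Option String → List String → String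
  | _, [] => ""
  | some pf, tok :: rest =>
      if pf = "-p" ∨ pf = "--package" ∨ pf = "--from" then tok
      else pvLoopA vf nvf none rest
  | none, tok :: rest =>
      if vf.contains tok then pvLoopA vf nvf (some tok) rest
      else if nvf.contains tok then pvLoopA vf nvf none rest
      else if PySem.Str.startswith tok "-" then pvLoopA vf nvf none rest
      else tok

def infer_package_spec_py (runner : String) (args : List String) : String :=
  pvLoopA (pvValueFlags runner) (pvNoValueFlags runner) none args

-- ===== PORT B =====
-- B's loop body over reversed(args): state is (res, res_next, head) for the suffix
-- starting at the current token; none in res stands for the ValueError path (outside Pre_).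
def pvStepB (vf nvf : List String) (st : Option String × Option String × Option String)
    (tok : String) : Option String × Option String × Option String :=
  let cur :=
    if vf.contains tok then
      if ["-p", "--package", "--from"].contains tok then st.2.2 else st.2.1
    else if nvf.contains tok || PySem.Str.startswith tok "-" then st.1
    else some tok
  (cur, st.1, some tok)

def infer_package_spec_py_alt (runner : String) (args : List String) : String :=
  ((args.reverse.foldl (pvStepB (pvValueFlags runner) (pvNoValueFlags runner))
      (none, none, none)).1).getD ""

-- ===== PRECONDITION & SPEC =====
-- Pre_ holds exactly when the scan yields a package token; on its complement the Python
-- (both A and B) raises ValueError, so those inputs are excluded.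
def pvReturns (vf nvf : List String) : List String → Bool
  | [] => false
  | tok :: rest =>
      if vf.contains tok then
        if tok = "-p" ∨ tok = "--package" ∨ tok = "--from" then !rest.isEmpty
        else
          match rest with
          | [] => false
          | _ :: rest' => pvReturns vf nvf rest'
      else if nvf.contains tok || PySem.Str.startswith tok "-" then pvReturns vf nvf rest
      else true

def Pre_infer_package_spec_py (runner : String) (args : List String) : Prop :=
  pvReturns (pvValueFlags runner) (pvNoValueFlags runner) args = true
instance (runner : String) (args : List String) : Decidable (Pre_infer_package_spec_py runner args) := by unfold Pre_infer_package_spec_py; infer_instance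

def pvWitness_infer_package_spec_py : String × List String := ("npx", ["-y", "cowsay"])

def Spec_infer_package_spec_py (runner : String) (args : List String) (out : String) : Prop := out = infer_package_spec_py_alt runner args
instance (runner : String) (args : List String) (out : String) : Decidable (Spec_infer_package_spec_py runner args out) := by unfold Spec_infer_package_spec_py; infer_instance

-- ===== CLAIM (what is proved, stated in full; the proofs are below) =====
def Claim_equal_infer_package_spec_py : Prop := ∀ (runner : String) (args : List String), Dom_infer_package_spec_py runner args → Pre_infer_package_spec_py runner args → Spec_infer_package_spec_py runner args (infer_package_spec_py runner args)

-- ===== LEMMAS AND PROOFS =====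
-- pvS l = the answer of scanning the suffix l from a clean state (none = ValueError path);
-- this is the value B's DP computes for each suffix.
def pvS (vf nvf : List String) : List String → Option String
  | [] => none
  | tok :: rest =>
      if vf.contains tok then
        if ["-p", "--package", "--from"].contains tok then rest.head?
        else pvS vf nvf rest.tail
      else if nvf.contains tok || PySem.Str.startswith tok "-" then pvS vf nvf rest
      else some tok
  termination_by l => l.length
  decreasing_by
    all_goals simp [List.length_tail]

lemma pvFoldB_eq_pvS (vf nvf : List String) :
    ∀ l : List String, l.reverse.foldl (pvStepB vf nvf) (none, none, none) =
      (pvS vf nvf l, pvS vf nvf l.tail, l.head?) := by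
  intro l
  induction l with
  | nil => simp [pvS]
  | cons tok rest ih =>
    rw [List.reverse_cons, List.foldl_append, ih]
    simp only [List.foldl, pvStepB, pvS, List.head?_cons, List.tail_cons]

lemma pvLoopA_eq_pvS (vf nvf : List String) :
    ∀ (n : Nat) (l : List String), l.length ≤ n →
      pvLoopA vf nvf none l = (pvS vf nvf l).getD "" := by
  intro n
  induction n with
  | zero =>
    intro l h
    have : l = [] := List.eq_nil_of_length_eq_zero (by omega)
    subst this; simp [pvLoopA, pvS]
  | succ n ih =>
    intro l h
    match l with
    | [] => simp [pvLoopA, pvS]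
    | tok :: rest =>
      by_cases hv : tok ∈ vf
      · by_cases hp : tok = "-p" ∨ tok = "--package" ∨ tok = "--from"
        · cases rest with
          | nil => simp [pvLoopA, pvS, hv, hp]
          | cons x r => simp [pvLoopA, pvS, hv, hp]
        · cases rest with
          | nil => simp [pvLoopA, pvS, hv, hp]
          | cons x r =>
            have := ih r (by simp at h ⊢; omega)
            simp [pvLoopA, pvS, hv, hp, this]
      · by_cases hn : tok ∈ nvf
        · have := ih rest (by simp at h ⊢; omega)
          simp [pvLoopA, pvS, hv, hn, this]
        · cases hs : PySem.Str.startswith tok "-" with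
          | true =>
            have := ih rest (by simp at h ⊢; omega)
            have hs' : PySem.Chars.startswith tok.toList ['-'] = true := by simpa using hs
            simp [pvLoopA, pvS, hv, hn, hs', this]
          | false =>
            have hs' : PySem.Chars.startswith tok.toList ['-'] = false := by simpa using hs
            simp [pvLoopA, pvS, hv, hn, hs']

-- ===== VERDICT (by name: the statement is the Claim_ definition above) =====
theorem infer_package_spec_py_spec : Claim_equal_infer_package_spec_py := by
  intro runner args _ _
  unfold Spec_infer_package_spec_py infer_package_spec_py infer_package_spec_py_alt
  rw [pvFoldB_eq_pvS, pvLoopA_eq_pvS _ _ args.length args (le_refl _)]
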